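-- pv_equiv track=rewrite | github.com/Yarik174/pattern_interruption | src/multi_league_predictor.py | _check_alternation
-- ===== SOURCE A (Python) =====
-- def _check_alternation(results):
--     """Проверить чередование (WLWLWL)"""
--     if len(results) < 4:
--         return 0
--
--     alt_count = 0
--     for i in range(len(results) - 1, 0, -1):
--         if results[i] != results[i-1]:
--             alt_count += 1
--         else:
--             break
--
--     return alt_count
-- ===== SOURCE B (Python) =====
-- def _check_alternation(results):
--     """Forward single pass over adjacent pairs: reset-on-equal counter; its final
--     value is the trailing alternating run length. Same <4 guard as A."""
--     if len(results) < 4: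
--         return 0
--     alt_count = 0
--     for prev, cur in zip(results, results[1:]):
--         alt_count = alt_count + 1 if cur != prev else 0
--     return alt_count
-- ===== Notes on version B (the rewrite author's own statement) =====
-- stated objective: alternative
-- what changed: Replaced the backward index loop with break by a forward fold over zipped adjacent pairs whose counter resets to 0 on an equal pair, so the final counter is the trailing alternating run length with no early exit and no indexing.
import Mathlib
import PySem

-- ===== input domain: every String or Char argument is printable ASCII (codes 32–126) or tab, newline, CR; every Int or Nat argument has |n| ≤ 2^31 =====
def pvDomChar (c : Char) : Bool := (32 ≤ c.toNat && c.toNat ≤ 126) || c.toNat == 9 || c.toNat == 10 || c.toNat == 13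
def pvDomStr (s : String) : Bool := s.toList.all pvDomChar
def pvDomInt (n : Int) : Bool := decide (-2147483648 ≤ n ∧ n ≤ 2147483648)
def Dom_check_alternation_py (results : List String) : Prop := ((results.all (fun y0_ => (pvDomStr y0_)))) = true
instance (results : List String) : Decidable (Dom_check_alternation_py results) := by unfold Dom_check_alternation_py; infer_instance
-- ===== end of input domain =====

-- B replaces A's backward break-loop by a forward reset-counter fold over adjacent pairs (alternative decomposition, same cost).

-- ===== PORT A =====
-- A's for-loop with break, as recursion over the descending index list range(len-1, 0, -1);
-- pyGetD with default "" is exact here: every index the loop visits satisfies 1 ≤ i ≤ len-1, in range.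
def pvALoop (results : List String) : List Int → Int → Int
  | [], alt_count => alt_count
  | i :: rest, alt_count =>
      if PySem.List.pyGetD results i "" ≠ PySem.List.pyGetD results (i - 1) ""
      then pvALoop results rest (alt_count + 1)
      else alt_count

def check_alternation_py (results : List String) : Int :=
  if (results.length : Int) < 4 then 0
  else pvALoop results (PySem.List.pyRange ((results.length : Int) - 1) 0 (-1)) 0

-- ===== PORT B =====
def check_alternation_py_alt (results : List String) : Int :=
  if (results.length : Int) < 4 then 0
  else (results.zip (PySem.List.slice results (some 1) none)).foldl
        (fun alt_count pc => if pc.2 ≠ pc.1 then alt_count + 1 else 0) 0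

-- ===== PRECONDITION & SPEC =====
def Spec_check_alternation_py (results : List String) (out : Int) : Prop := out = check_alternation_py_alt results
instance (results : List String) (out : Int) : Decidable (Spec_check_alternation_py results out) := by unfold Spec_check_alternation_py; infer_instance

-- ===== CLAIM (what is proved, stated in full; the proofs are below) =====
def Claim_equal_check_alternation_py : Prop := ∀ (results : List String), Dom_check_alternation_py results → Spec_check_alternation_py results (check_alternation_py results)

-- ===== LEMMAS AND PROOFS =====

-- A's loop equals the length of the satisfied prefix of its index list, added to the accumulator.
theorem pvALoop_eq_takeWhile (results : List String) (l : List Int) (acc : Int) :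
    pvALoop results l acc =
      acc + ((l.takeWhile (fun i =>
        decide (PySem.List.pyGetD results i "" ≠ PySem.List.pyGetD results (i - 1) ""))).length : Int) := by
  induction l generalizing acc with
  | nil => simp [pvALoop]
  | cons i rest ih =>
    by_cases h : PySem.List.pyGetD results i "" ≠ PySem.List.pyGetD results (i - 1) ""
    · simp [pvALoop, h, ih]
      omega
    · simp [pvALoop, h]

-- B's reset-counter fold equals the length of the satisfied suffix (trailing run) of the pair list.
theorem pvBFold_eq_takeWhile_reverse (ps : List (String × String)) :
    ps.foldl (fun alt_count pc => if pc.2 ≠ pc.1 then alt_count + 1 else 0) 0 =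
      ((ps.reverse.takeWhile (fun pc => decide (pc.2 ≠ pc.1))).length : Int) := by
  induction ps using List.reverseRecOn with
  | nil => simp
  | append_singleton ds d ih =>
    rw [List.foldl_append, ih, List.reverse_append]
    by_cases h : d.2 ≠ d.1 <;> simp [h]

-- The reversed adjacent-pair list is the descending index range mapped to index pairs.
theorem pvPairs_eq_map_range (results : List String) :
    (results.zip results.tail).reverse =
      (PySem.List.pyRange ((results.length : Int) - 1) 0 (-1)).map
        (fun i => (PySem.List.pyGetD results (i - 1) "", PySem.List.pyGetD results i "")) := by
  rw [PySem.List.pyRange_neg_one]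
  apply List.ext_getElem
  · simp
  · intro k h1 h2
    simp only [List.length_reverse, List.length_zip, List.length_tail] at h1
    have hn : k + 1 < results.length := by omega
    simp only [List.getElem_reverse, List.getElem_zip, List.getElem_map, List.getElem_range,
      List.length_zip, List.length_tail]
    have e1 : (results.length : Int) - 1 - (k : Int) - 1 = ((results.length - 2 - k : Nat) : Int) := by
      omega
    have e2 : (results.length : Int) - 1 - (k : Int) = ((results.length - 1 - k : Nat) : Int) := by
      omega
    rw [e1, e2, PySem.List.pyGetD_natCast, PySem.List.pyGetD_natCast]
    have h3 : results.length - 2 - k < results.length := by omega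
    have h4 : results.length - 1 - k < results.length := by omega
    rw [List.getD_eq_getElem _ _ h3, List.getD_eq_getElem _ _ h4, List.getElem_tail]
    have i1 : min results.length (results.length - 1) - 1 - k = results.length - 2 - k := by omega
    have i2 : min results.length (results.length - 1) - 1 - k + 1 = results.length - 1 - k := by omega
    simp
    constructor <;> (congr 1 <;> omega)

-- ===== VERDICT (by name: the statement is the Claim_ definition above) =====
theorem check_alternation_py_spec : Claim_equal_check_alternation_py := by
  intro results _
  unfold Spec_check_alternation_py check_alternation_py check_alternation_py_alt
  by_cases h4 : (results.length : Int) < 4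
  · simp [h4]
  · simp only [h4, if_false]
    rw [PySem.List.slice_from_one, pvALoop_eq_takeWhile, pvBFold_eq_takeWhile_reverse,
      pvPairs_eq_map_range, List.takeWhile_map]
    simp only [Function.comp_def, List.length_map]
    omega
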